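-- pv_equiv track=rewrite | github.com/kimminki10/algorithms2 | z.uncategorized/boj26170.py | bfs
-- ===== SOURCE A (Python) =====
-- di = [[0,1],[1,0],[-1,0],[0,-1]]
--
-- def bfs(r,c, jido) -> int:
--     q = [[r,c, jido[r][c], {(r,c)}]]
--     while q:
--         a,b,s,d = q.pop(0)
--         for x, y in di:
--             nx, ny = a+x, b+y
--             if 0 <= nx < 5 and 0 <= ny < 5 and jido[nx][ny] != -1 and (nx,ny) not in d:
--                 ns = s+jido[nx][ny]
--                 if ns == 3: return len(d)
--                 q.append([nx,ny,ns, d|{(nx,ny)}])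
--     return -1
-- ===== SOURCE B (Python) =====
-- di = [[0, 1], [1, 0], [-1, 0], [0, -1]]
--
-- def bfs(r, c, jido) -> int:
--     def dfs(a, b, s, visited):
--         best = None
--         for x, y in di:
--             nx, ny = a + x, b + y
--             if 0 <= nx < 5 and 0 <= ny < 5 and jido[nx][ny] != -1 and (nx, ny) not in visited:
--                 ns = s + jido[nx][ny]
--                 cand = len(visited) if ns == 3 else dfs(nx, ny, ns, visited | {(nx, ny)})
--                 if cand is not None and (best is None or cand < best):
--                     best = cand
--         return best
--     res = dfs(r, c, jido[r][c], {(r, c)})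
--     return -1 if res is None else res
-- ===== Notes on version B (the rewrite author's own statement) =====
-- stated objective: alternative
-- what changed: Replaces the FIFO-queue BFS with early return on the first completing path by a recursive DFS that explores the whole search tree and aggregates the minimum completing-path length (the two agree because queue levels are processed in order of path length).
-- outside the precondition, e.g. on bfs(0, 0, [[1, 2]]): A returns 1, B raises IndexError
import Mathlib
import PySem

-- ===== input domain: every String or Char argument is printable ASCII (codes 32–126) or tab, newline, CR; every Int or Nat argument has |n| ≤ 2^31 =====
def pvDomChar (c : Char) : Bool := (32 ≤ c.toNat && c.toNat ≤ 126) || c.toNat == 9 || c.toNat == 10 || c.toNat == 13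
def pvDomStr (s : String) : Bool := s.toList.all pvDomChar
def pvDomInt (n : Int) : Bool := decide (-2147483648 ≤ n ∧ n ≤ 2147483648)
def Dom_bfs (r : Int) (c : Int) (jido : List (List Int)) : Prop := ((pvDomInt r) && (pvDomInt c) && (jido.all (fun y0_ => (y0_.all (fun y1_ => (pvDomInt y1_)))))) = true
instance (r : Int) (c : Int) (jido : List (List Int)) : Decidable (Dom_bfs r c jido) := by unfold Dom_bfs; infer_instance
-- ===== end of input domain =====

-- B replaces A's FIFO-queue BFS (early return on the first completing path) by a recursive DFS that
-- takes the minimum completing-path length over the whole search tree; same return value, no speed claim.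

-- ===== PORT A =====

-- di = [[0,1],[1,0],[-1,0],[0,-1]]
def pvDirs : List (Int × Int) := [(0, 1), (1, 0), (-1, 0), (0, -1)]

-- jido[i][j]; total via default 0 — exact (= Python) on every access inside Pre_bfs
def getCell (jido : List (List Int)) (i j : Int) : Int :=
  (PySem.List.pyGet? ((PySem.List.pyGet? jido i).getD []) j).getD 0

-- termination measure helpers (proof apparatus only; cited by the ports' decreasing_by)
def pvInGrid (p : Int × Int) : Bool := decide (0 ≤ p.1 ∧ p.1 < 5 ∧ 0 ≤ p.2 ∧ p.2 < 5)
def pvGridL : List (Int × Int) := (List.range 5).flatMap (fun i => (List.range 5).map (fun j => ((i : Int), (j : Int))))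
def mIdx (d : List (Int × Int)) : Nat := (d.filter pvInGrid).toFinset.card

lemma mem_pvGridL (p : Int × Int) (h : pvInGrid p = true) : p ∈ pvGridL := by
  obtain ⟨x, y⟩ := p
  simp only [pvInGrid, decide_eq_true_eq] at h
  obtain ⟨h1, h2, h3, h4⟩ := h
  have hx : x = 0 ∨ x = 1 ∨ x = 2 ∨ x = 3 ∨ x = 4 := by omega
  have hy : y = 0 ∨ y = 1 ∨ y = 2 ∨ y = 3 ∨ y = 4 := by omega
  rcases hx with rfl | rfl | rfl | rfl | rfl <;> rcases hy with rfl | rfl | rfl | rfl | rfl <;> decide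

lemma mIdx_le (d : List (Int × Int)) : mIdx d ≤ 25 := by
  have h1 : (d.filter pvInGrid).toFinset ⊆ pvGridL.toFinset := by
    intro p hp
    rw [List.mem_toFinset] at hp ⊢
    exact mem_pvGridL p (List.of_mem_filter hp)
  have h2 := Finset.card_le_card h1
  have h3 : pvGridL.toFinset.card = 25 := by decide
  unfold mIdx
  omega

lemma set_add_of_not_mem (d : List (Int × Int)) (p : Int × Int) (h : p ∉ d) :
    PySem.Set.add d p = d ++ [p] := by
  simp [PySem.Set.add, PySem.Set.contains, h]

lemma mIdx_add (d : List (Int × Int)) (p : Int × Int) (hg : pvInGrid p = true) (hm : p ∉ d) :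
    mIdx (PySem.Set.add d p) = mIdx d + 1 := by
  rw [set_add_of_not_mem d p hm]
  have hnm : p ∉ (d.filter pvInGrid).toFinset := by
    rw [List.mem_toFinset]
    intro hx
    exact hm (List.mem_of_mem_filter hx)
  unfold mIdx
  have hfil : (d ++ [p]).filter pvInGrid = d.filter pvInGrid ++ [p] := by
    rw [List.filter_append]; simp [hg]
  rw [hfil, List.toFinset_append]
  have h1 : [p].toFinset = {p} := by simp
  rw [h1, Finset.union_singleton, Finset.card_insert_of_notMem hnm]

lemma len_add_of_not_mem (d : List (Int × Int)) (p : Int × Int) (h : p ∉ d) :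
    (PySem.Set.add d p).length = d.length + 1 := by
  rw [set_add_of_not_mem d p h]; simp

-- the inner `for x, y in di` loop of A: either an early `return len(d)` (inl) or the children appended to q (inr)
def scanDirs (jido : List (List Int)) (a b s : Int) (d : List (Int × Int)) :
    List (Int × Int) → Int ⊕ List (Int × Int × Int × List (Int × Int))
  | [] => Sum.inr []
  | (x, y) :: rest =>
    let nx := a + x
    let ny := b + y
    if 0 ≤ nx ∧ nx < 5 ∧ 0 ≤ ny ∧ ny < 5 ∧ getCell jido nx ny ≠ -1 ∧ (nx, ny) ∉ d then
      if s + getCell jido nx ny = 3 then Sum.inl (d.length : Int)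
      else
        match scanDirs jido a b s d rest with
        | Sum.inl v => Sum.inl v
        | Sum.inr cs => Sum.inr ((nx, ny, s + getCell jido nx ny, PySem.Set.add d (nx, ny)) :: cs)
    else scanDirs jido a b s d rest

lemma scan_inr_meta (jido : List (List Int)) (a b s : Int) (d : List (Int × Int)) :
    ∀ (dirs : List (Int × Int)) (cs : List (Int × Int × Int × List (Int × Int))),
      scanDirs jido a b s d dirs = Sum.inr cs →
      cs.length ≤ dirs.length ∧
        ∀ e ∈ cs, e.2.2.2.length = d.length + 1 ∧ mIdx e.2.2.2 = mIdx d + 1 := by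
  intro dirs
  induction dirs with
  | nil =>
    intro cs h
    simp only [scanDirs] at h
    injection h with h
    subst h
    simp
  | cons hd rest ih =>
    intro cs h
    obtain ⟨x, y⟩ := hd
    simp only [scanDirs] at h
    split at h
    · rename_i hg
      split at h
      · exact absurd h (by simp)
      · split at h
        · exact absurd h (by simp)
        · rename_i cs' hrec
          obtain ⟨rfl⟩ := Sum.inr.inj h
          obtain ⟨hl, hall⟩ := ih cs' hrec
          refine ⟨by simp only [List.length_cons]; omega, ?_⟩
          intro e he
          rcases List.mem_cons.mp he with rfl | he'
          · constructor
            · exact len_add_of_not_mem d _ hg.2.2.2.2.2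
            · exact mIdx_add d _ (by simp [pvInGrid]; exact ⟨hg.1, hg.2.1, hg.2.2.1, hg.2.2.2.1⟩) hg.2.2.2.2.2
          · exact hall e he'
    · obtain ⟨hl, hall⟩ := ih cs h
      exact ⟨Nat.le_succ_of_le hl, hall⟩

def pvMu (q : List (Int × Int × Int × List (Int × Int))) : Nat :=
  (q.map (fun e => 5 ^ (26 - mIdx e.2.2.2))).sum

lemma pvMu_children (jido : List (List Int)) (a b s : Int) (d : List (Int × Int))
    (cs : List (Int × Int × Int × List (Int × Int)))
    (h : scanDirs jido a b s d pvDirs = Sum.inr cs) : pvMu cs < 5 ^ (26 - mIdx d) := by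
  obtain ⟨hlen, hall⟩ := scan_inr_meta jido a b s d pvDirs cs h
  have hm := mIdx_le d
  have hmap : cs.map (fun e => 5 ^ (26 - mIdx e.2.2.2)) = cs.map (fun _ => 5 ^ (25 - mIdx d)) := by
    apply List.map_congr_left
    intro e he
    rw [(hall e he).2]
    congr 1
    omega
  have hsum : pvMu cs = cs.length * 5 ^ (25 - mIdx d) := by
    rw [pvMu, hmap, List.map_const', List.sum_replicate, smul_eq_mul]
  have hpow : 5 ^ (26 - mIdx d) = 5 * 5 ^ (25 - mIdx d) := by
    rw [show 26 - mIdx d = (25 - mIdx d) + 1 from by omega, pow_succ]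
    ring
  have hpos : 0 < 5 ^ (25 - mIdx d) := Nat.pow_pos (by omega)
  have h4 : cs.length ≤ 4 := by simpa [pvDirs] using hlen
  rw [hsum, hpow]
  calc cs.length * 5 ^ (25 - mIdx d) ≤ 4 * 5 ^ (25 - mIdx d) := Nat.mul_le_mul_right _ h4
    _ < 5 * 5 ^ (25 - mIdx d) := by omega

-- A's while-loop on the queue; q.pop(0) = take the head, q.append = ++ at the back
def loopA (jido : List (List Int)) : List (Int × Int × Int × List (Int × Int)) → Int
  | [] => -1
  | (a, b, s, d) :: rest =>
    match h : scanDirs jido a b s d pvDirs with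
    | Sum.inl v => v -- h is needed only in the Sum.inr branch's termination proof

    | Sum.inr cs => loopA jido (rest ++ cs)
termination_by q => pvMu q
decreasing_by
  have hc := pvMu_children jido a b s d cs h
  simp only [pvMu, List.map_append, List.sum_append, List.map_cons, List.sum_cons] at *
  omega

def bfs (r : Int) (c : Int) (jido : List (List Int)) : Int :=
  loopA jido [(r, c, getCell jido r c, PySem.Set.ofList [(r, c)])]

-- ===== PORT B =====

-- best-accumulator update of B's loop: min of the candidates seen so far (None = no candidate)
def ominOpt (o₁ o₂ : Option Int) : Option Int :=
  match o₁, o₂ with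
  | none, o => o
  | some v, none => some v
  | some v, some w => some (min v w)

-- B's recursive dfs; the `for x, y in di` loop is the recursion over the dirs list
def dfsB (jido : List (List Int)) :
    Int → Int → Int → List (Int × Int) → List (Int × Int) → Option Int
  | _, _, _, _, [] => none
  | a, b, s, visited, (x, y) :: rest =>
    let nx := a + x
    let ny := b + y
    let cand : Option Int :=
      if h : 0 ≤ nx ∧ nx < 5 ∧ 0 ≤ ny ∧ ny < 5 ∧ getCell jido nx ny ≠ -1 ∧ (nx, ny) ∉ visited then
        if s + getCell jido nx ny = 3 then some (visited.length : Int)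
        else dfsB jido nx ny (s + getCell jido nx ny) (PySem.Set.add visited (nx, ny)) pvDirs
      else none
    ominOpt cand (dfsB jido a b s visited rest)
termination_by _ _ _ visited dirs => (26 - mIdx visited, dirs.length)
decreasing_by
  · apply Prod.Lex.left
    have h1 : mIdx (PySem.Set.add visited (a + x, b + y)) = mIdx visited + 1 :=
      mIdx_add visited (a + x, b + y)
        (by simp only [pvInGrid, decide_eq_true_eq]; exact ⟨h.1, h.2.1, h.2.2.1, h.2.2.2.1⟩)
        h.2.2.2.2.2
    have h1' : mIdx (PySem.Set.add visited (nx, ny)) = mIdx visited + 1 := h1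
    have h2 := mIdx_le visited
    omega
  · apply Prod.Lex.right
    simp

def bfs_alt (r : Int) (c : Int) (jido : List (List Int)) : Int :=
  match dfsB jido r c (getCell jido r c) (PySem.Set.ofList [(r, c)]) pvDirs with
  | none => -1
  | some v => v

-- ===== PRECONDITION & SPEC =====

-- the four cells A probes from the start (r,c)
def pvNbrs (r c : Int) : List (Int × Int) := [(r, c + 1), (r + 1, c), (r - 1, c), (r, c - 1)]

-- Pre_: (r,c) is a valid Python start index, and no IndexError can follow: either no neighbor of
-- the start lies in the [0,5)² window, or every in-window neighbor of the start exists and is a -1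
-- wall, or the first five rows exist with ≥ 5 columns (so every probed cell exists). Slightly
-- narrower than A's exact returning set: A can also return on ragged boards whose missing cells
-- are never probed only because of an early hit or interior -1 walls; see the cited example.
def Pre_bfs (r : Int) (c : Int) (jido : List (List Int)) : Prop :=
  PySem.Raise.InRange jido.length r ∧
  PySem.Raise.InRange ((PySem.List.pyGet? jido r).getD []).length c ∧
  ((∀ p ∈ pvNbrs r c, ¬(0 ≤ p.1 ∧ p.1 < 5 ∧ 0 ≤ p.2 ∧ p.2 < 5)) ∨
   (∀ p ∈ pvNbrs r c, (0 ≤ p.1 ∧ p.1 < 5 ∧ 0 ≤ p.2 ∧ p.2 < 5) →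
      PySem.List.pyGet? ((PySem.List.pyGet? jido p.1).getD []) p.2 = some (-1)) ∨
   ((List.range 5).all (fun i => 5 ≤ (jido.getD i []).length)) = true)

instance (r : Int) (c : Int) (jido : List (List Int)) : Decidable (Pre_bfs r c jido) := by
  unfold Pre_bfs; infer_instance

def pvWitness_bfs : Int × Int × List (List Int) :=
  (0, 0, [[0, 0, 0, 0, 0], [0, -1, 0, 0, 0], [0, 0, 1, 2, 0], [0, 0, 0, 0, 0], [0, 0, 0, 0, 3]])

def Spec_bfs (r : Int) (c : Int) (jido : List (List Int)) (out : Int) : Prop := out = bfs_alt r c jido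
instance (r : Int) (c : Int) (jido : List (List Int)) (out : Int) : Decidable (Spec_bfs r c jido out) := by
  unfold Spec_bfs; infer_instance

-- ===== CLAIM (what is proved, stated in full; the proofs are below) =====
def Claim_equal_bfs : Prop := ∀ (r : Int) (c : Int) (jido : List (List Int)), Dom_bfs r c jido → Pre_bfs r c jido → Spec_bfs r c jido (bfs r c jido)

-- ===== LEMMAS AND PROOFS =====

def fE (jido : List (List Int)) (e : Int × Int × Int × List (Int × Int)) : Option Int :=
  dfsB jido e.1 e.2.1 e.2.2.1 e.2.2.2 pvDirs

def OminL (l : List (Option Int)) : Option Int := l.foldr ominOpt none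

lemma omin_none_right (o : Option Int) : ominOpt o none = o := by cases o <;> rfl

lemma omin_comm (o₁ o₂ : Option Int) : ominOpt o₁ o₂ = ominOpt o₂ o₁ := by
  cases o₁ <;> cases o₂ <;> simp [ominOpt, min_comm]

lemma omin_assoc (o₁ o₂ o₃ : Option Int) :
    ominOpt (ominOpt o₁ o₂) o₃ = ominOpt o₁ (ominOpt o₂ o₃) := by
  cases o₁ <;> cases o₂ <;> cases o₃ <;> simp [ominOpt, min_assoc]

lemma OminL_append (l₁ l₂ : List (Option Int)) :
    OminL (l₁ ++ l₂) = ominOpt (OminL l₁) (OminL l₂) := by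
  induction l₁ with
  | nil => simp [OminL, ominOpt]
  | cons x xs ih => simp only [OminL, List.foldr, List.cons_append] at *; rw [ih, omin_assoc]

-- every value dfs can return is at least the size of the visited set it started from
lemma dfsB_lb (jido : List (List Int)) :
    ∀ (a b s : Int) (vis dirs : List (Int × Int)) (v : Int),
      dfsB jido a b s vis dirs = some v → (vis.length : Int) ≤ v := by
  intro a b s vis dirs
  induction a, b, s, vis, dirs using dfsB.induct jido with
  | case1 a b s vis =>
    intro v h
    simp [dfsB] at h
  | case2 a b s vis x y rest nx ny ih1 ih2 =>
    intro v h
    simp only [dfsB] at h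
    split at h
    · rename_i hg
      have hlen : (PySem.Set.add vis (a + x, b + y)).length = vis.length + 1 :=
        len_add_of_not_mem vis (a + x, b + y) hg.2.2.2.2.2
      split at h
      · cases hr : dfsB jido a b s vis rest with
        | none => rw [hr] at h; simp only [ominOpt, Option.some.injEq] at h; omega
        | some w =>
          rw [hr] at h
          simp only [ominOpt, Option.some.injEq] at h
          have := ih2 w hr
          omega
      · cases hc : dfsB jido (a + x) (b + y) (s + getCell jido (a + x) (b + y))
            (PySem.Set.add vis (a + x, b + y)) pvDirs with
        | none =>
          rw [hc] at h
          simp only [ominOpt] at h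
          exact ih2 v h
        | some w =>
          have hw := ih1 hg w hc
          rw [hlen] at hw
          push_cast at hw
          rw [hc] at h
          cases hr : dfsB jido a b s vis rest with
          | none => rw [hr] at h; simp only [ominOpt, Option.some.injEq] at h; omega
          | some w' =>
            rw [hr] at h
            simp only [ominOpt, Option.some.injEq] at h
            have := ih2 w' hr
            omega
    · simp only [ominOpt] at h
      exact ih2 v h

lemma scan_inl_eq (jido : List (List Int)) (a b s : Int) (d : List (Int × Int)) :
    ∀ (dirs : List (Int × Int)) (v : Int),
      scanDirs jido a b s d dirs = Sum.inl v → v = (d.length : Int) := by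
  intro dirs
  induction dirs with
  | nil => intro v h; simp [scanDirs] at h
  | cons hd rest ih =>
    intro v h
    obtain ⟨x, y⟩ := hd
    simp only [scanDirs] at h
    split at h
    · split at h
      · exact (Sum.inl.inj h).symm
      · cases hrec : scanDirs jido a b s d rest with
        | inl v' => rw [hrec] at h; exact (Sum.inl.inj h) ▸ ih v' hrec
        | inr cs => rw [hrec] at h; exact absurd h (by simp)
    · exact ih v h

lemma scan_inl_dfs (jido : List (List Int)) (a b s : Int) (d : List (Int × Int)) :
    ∀ (dirs : List (Int × Int)) (v : Int),
      scanDirs jido a b s d dirs = Sum.inl v →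
      dfsB jido a b s d dirs = some (d.length : Int) := by
  intro dirs
  induction dirs with
  | nil => intro v h; simp [scanDirs] at h
  | cons hd rest ih =>
    intro v h
    obtain ⟨x, y⟩ := hd
    simp only [scanDirs] at h
    simp only [dfsB]
    split at h
    · rename_i hg
      rw [dif_pos hg]
      have hlen : (PySem.Set.add d (a + x, b + y)).length = d.length + 1 :=
        len_add_of_not_mem d (a + x, b + y) hg.2.2.2.2.2
      split at h
      · rename_i hhit
        rw [if_pos hhit]
        cases hr : dfsB jido a b s d rest with
        | none => rfl
        | some w =>
          have := dfsB_lb jido a b s d rest w hr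
          simp only [ominOpt, Option.some.injEq]
          omega
      · rename_i hhit
        rw [if_neg hhit]
        cases hrec : scanDirs jido a b s d rest with
        | inl v' =>
          rw [hrec] at h
          have hr := ih v' hrec
          rw [hr]
          cases hc : dfsB jido (a + x) (b + y) (s + getCell jido (a + x) (b + y))
              (PySem.Set.add d (a + x, b + y)) pvDirs with
          | none => rfl
          | some w =>
            have hw := dfsB_lb jido _ _ _ _ _ w hc
            rw [hlen] at hw
            push_cast at hw
            simp only [ominOpt, Option.some.injEq]
            omega
        | inr cs => rw [hrec] at h; exact absurd h (by simp)
    · rename_i hg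
      rw [dif_neg hg]
      simp only [ominOpt]
      exact ih v h

lemma scan_inr_dfs (jido : List (List Int)) (a b s : Int) (d : List (Int × Int)) :
    ∀ (dirs : List (Int × Int)) (cs : List (Int × Int × Int × List (Int × Int))),
      scanDirs jido a b s d dirs = Sum.inr cs →
      dfsB jido a b s d dirs = OminL (cs.map (fE jido)) := by
  intro dirs
  induction dirs with
  | nil =>
    intro cs h
    simp only [scanDirs] at h
    injection h with h
    subst h
    simp [dfsB, OminL]
  | cons hd rest ih =>
    intro cs h
    obtain ⟨x, y⟩ := hd
    simp only [scanDirs] at h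
    simp only [dfsB]
    split at h
    · rename_i hg
      rw [dif_pos hg]
      split at h
      · exact absurd h (by simp)
      · rename_i hhit
        rw [if_neg hhit]
        cases hrec : scanDirs jido a b s d rest with
        | inl v' => rw [hrec] at h; exact absurd h (by simp)
        | inr cs' =>
          rw [hrec] at h
          injection h with h
          subst h
          rw [ih cs' hrec]
          rfl
    · rename_i hg
      rw [dif_neg hg]
      simp only [ominOpt]
      exact ih cs h

-- queue invariant: a level-k block followed by a level-(k+1) block (levels = sizes of the visited sets)
def LevOK (k : Nat) (q : List (Int × Int × Int × List (Int × Int))) : Prop :=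
  ∃ qa qb, q = qa ++ qb ∧ (∀ e ∈ qa, e.2.2.2.length = k) ∧ (∀ e ∈ qb, e.2.2.2.length = k + 1)

lemma lev_head_min (k : Nat) (e : Int × Int × Int × List (Int × Int))
    (rest : List (Int × Int × Int × List (Int × Int))) (h : LevOK k (e :: rest)) :
    ∀ e' ∈ rest, e.2.2.2.length ≤ e'.2.2.2.length := by
  obtain ⟨qa, qb, heq, ha, hb⟩ := h
  intro e' he'
  cases qa with
  | nil =>
    simp only [List.nil_append] at heq
    rw [hb e (heq ▸ List.mem_cons_self), hb e' (heq ▸ List.mem_cons_of_mem _ he')]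
  | cons f qa' =>
    simp only [List.cons_append, List.cons.injEq] at heq
    obtain ⟨rfl, hrest⟩ := heq
    rw [ha e (List.mem_cons_self)]
    rcases List.mem_append.mp (hrest ▸ he') with h1 | h2
    · rw [ha e' (List.mem_cons_of_mem _ h1)]
    · rw [hb e' h2]; omega

lemma lev_step (k : Nat) (e : Int × Int × Int × List (Int × Int))
    (rest cs : List (Int × Int × Int × List (Int × Int))) (h : LevOK k (e :: rest))
    (hcs : ∀ e' ∈ cs, e'.2.2.2.length = e.2.2.2.length + 1) :
    ∃ k', LevOK k' (rest ++ cs) := by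
  obtain ⟨qa, qb, heq, ha, hb⟩ := h
  cases qa with
  | nil =>
    simp only [List.nil_append] at heq
    refine ⟨k + 1, rest, cs, rfl, ?_, ?_⟩
    · intro e' he'
      exact hb e' (heq ▸ List.mem_cons_of_mem _ he')
    · intro e' he'
      rw [hcs e' he', hb e (heq ▸ List.mem_cons_self)]
  | cons f qa' =>
    simp only [List.cons_append, List.cons.injEq] at heq
    obtain ⟨rfl, rfl⟩ := heq
    refine ⟨k, qa', qb ++ cs, by rw [List.append_assoc], ?_, ?_⟩
    · intro e' he'
      exact ha e' (List.mem_cons_of_mem _ he')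
    · intro e' he'
      rcases List.mem_append.mp he' with h1 | h2
      · exact hb e' h1
      · rw [hcs e' h2, ha e (List.mem_cons_self)]

lemma omin_dominates (v : Int) (l : List (Option Int))
    (h : ∀ o ∈ l, ∀ w : Int, o = some w → v ≤ w) : ominOpt (some v) (OminL l) = some v := by
  induction l with
  | nil => rfl
  | cons o t ih =>
    have ht : ∀ o' ∈ t, ∀ w : Int, o' = some w → v ≤ w :=
      fun o' h' w hw => h o' (List.mem_cons_of_mem _ h') w hw
    show ominOpt (some v) (ominOpt o (OminL t)) = some v
    rw [← omin_assoc]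
    cases o with
    | none => rw [omin_none_right]; exact ih ht
    | some w =>
      have hvw : v ≤ w := h (some w) (List.mem_cons_self) w rfl
      have : ominOpt (some v) (some w) = some v := by
        simp only [ominOpt, Option.some.injEq]
        omega
      rw [this]
      exact ih ht

-- main simulation: on a level-structured queue, A's loop computes the minimum of B's dfs
-- over the queue entries (-1 when there is none)
lemma key (jido : List (List Int)) :
    ∀ q : List (Int × Int × Int × List (Int × Int)),
      (∃ k, LevOK k q) → loopA jido q = (OminL (q.map (fE jido))).getD (-1) := by
  intro q
  induction q using loopA.induct jido with
  | case1 => intro _; simp [loopA, OminL]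
  | case2 a b s d rest v h =>
    intro ⟨k, hlev⟩
    have hv := scan_inl_eq jido a b s d pvDirs v h
    have hd := scan_inl_dfs jido a b s d pvDirs v h
    have hloop : loopA jido ((a, b, s, d) :: rest) = v := by
      rw [loopA, h]
    rw [hloop, hv]
    have hdom : ∀ o ∈ rest.map (fE jido), ∀ w : Int, o = some w → (d.length : Int) ≤ w := by
      intro o ho w hw
      obtain ⟨e', he', rfl⟩ := List.mem_map.mp ho
      have h1 := dfsB_lb jido e'.1 e'.2.1 e'.2.2.1 e'.2.2.2 pvDirs w hw
      have h2 := lev_head_min k (a, b, s, d) rest hlev e' he'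
      simp only at h2
      have : (d.length : Int) ≤ (e'.2.2.2.length : Int) := by exact_mod_cast h2
      omega
    have : OminL (((a, b, s, d) :: rest).map (fE jido)) = some (d.length : Int) := by
      show ominOpt (fE jido (a, b, s, d)) (OminL (rest.map (fE jido))) = _
      have : fE jido (a, b, s, d) = some (d.length : Int) := hd
      rw [this]
      exact omin_dominates _ _ hdom
    rw [this]
    rfl
  | case3 a b s d rest cs h ih =>
    intro ⟨k, hlev⟩
    have hmeta := scan_inr_meta jido a b s d pvDirs cs h
    have hstep := lev_step k (a, b, s, d) rest cs hlev
      (fun e' he' => (hmeta.2 e' he').1)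
    have hloop : loopA jido ((a, b, s, d) :: rest) = loopA jido (rest ++ cs) := by
      rw [loopA, h]
    rw [hloop, ih hstep]
    have hfe : fE jido (a, b, s, d) = OminL (cs.map (fE jido)) :=
      scan_inr_dfs jido a b s d pvDirs cs h
    rw [List.map_append, OminL_append, omin_comm]
    show _ = (ominOpt (fE jido (a, b, s, d)) (OminL (rest.map (fE jido)))).getD (-1)
    rw [hfe, omin_comm]

-- ===== VERDICT (by name: the statement is the Claim_ definition above) =====
theorem bfs_spec : Claim_equal_bfs := by
  intro r c jido _ _
  show bfs r c jido = bfs_alt r c jido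
  unfold bfs bfs_alt
  rw [key jido _ ⟨1, [(r, c, getCell jido r c, PySem.Set.ofList [(r, c)])], [], by simp,
    by intro e he; simp at he; subst he; rfl, by simp⟩]
  cases hd : dfsB jido r c (getCell jido r c) (PySem.Set.ofList [(r, c)]) pvDirs <;>
    simp [OminL, fE, ominOpt, hd]
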